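-- pv_equiv track=rewrite | github.com/arimax32/Network-SImulations | Carrier Sense/CDMA/channel.py | updateWalshTable
-- ===== SOURCE A (Python) =====
-- import copy
--
-- code = {'0' : -1 , '1' : 1}
--
-- def updateWalshTable(walshtable, bit, data, p):
--     n = len(data)
--     table = copy.deepcopy(walshtable)
--     for station in range(n):
--         for j in range(p):
--             if bit >= len(data[station]):
--                 table[station][j] = 0
--             else:
--                 table[station][j] *= code[data[station][bit]]
--
--     sum_t = []
--     for j in range(p):
--         tsum = 0
--         for i in range(n):
--             tsum += table[i][j]
--         sum_t.append(tsum)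
--     return sum_t
-- ===== SOURCE B (Python) =====
-- code = {'0': -1, '1': 1}
--
-- def updateWalshTable(walshtable, bit, data, p):
--     return [
--         sum(0 if bit >= len(s) else walshtable[i][j] * code[s[bit]]
--             for i, s in enumerate(data))
--         for j in range(p)
--     ]
-- ===== Notes on version B (the rewrite author's own statement) =====
-- stated objective: simpler
-- what changed: B drops A's deepcopy and the mutated intermediate table entirely and computes each column sum directly with one nested comprehension (columns outer, stations inner), maintaining nothing but the running per-column total.
import Mathlib
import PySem

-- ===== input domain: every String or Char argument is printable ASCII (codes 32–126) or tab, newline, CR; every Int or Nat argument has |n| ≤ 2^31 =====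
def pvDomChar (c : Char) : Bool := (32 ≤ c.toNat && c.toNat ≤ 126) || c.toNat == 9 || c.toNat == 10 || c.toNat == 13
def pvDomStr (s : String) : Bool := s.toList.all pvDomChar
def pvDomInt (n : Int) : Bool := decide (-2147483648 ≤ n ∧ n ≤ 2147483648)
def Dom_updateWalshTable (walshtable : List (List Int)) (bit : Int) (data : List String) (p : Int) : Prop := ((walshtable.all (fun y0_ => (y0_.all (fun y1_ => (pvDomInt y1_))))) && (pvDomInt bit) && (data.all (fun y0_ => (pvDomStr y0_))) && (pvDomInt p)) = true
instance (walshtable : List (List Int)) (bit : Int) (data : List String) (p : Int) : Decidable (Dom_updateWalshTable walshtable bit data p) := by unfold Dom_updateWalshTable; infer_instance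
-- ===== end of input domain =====

-- B drops A's deepcopy and the mutated intermediate table and computes each column sum directly
-- (objective: simpler); return-value equivalence only — A mutates no argument (it deep-copies first).

-- the module-level dict  code = {'0': -1, '1': 1}  (shared context of A and B)
def codeDict : PySem.Dict Char Int := PySem.Dict.ofList [('0', -1), ('1', 1)]

-- list-index ASSIGNMENT xs[i] = v; exact for 0 ≤ i < len(xs), the only indices the loops
-- reach inside Pre_ (out of range Python raises IndexError — excluded by Pre_)
def pySetAt {α : Type} (xs : List α) (i : Int) (v : α) : List α := xs.set i.toNat v

-- ===== PORT A =====
def updateWalshTable (walshtable : List (List Int)) (bit : Int) (data : List String) (p : Int) : List Int :=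
  let n : Int := PySem.List.len data
  let table :=
    (PySem.List.pyRange 0 n 1).foldl (fun table station =>
      (PySem.List.pyRange 0 p 1).foldl (fun table j =>
        let s := (PySem.List.pyGet? data station).getD ""
        if bit ≥ PySem.Str.len s then
          pySetAt table station
            (pySetAt ((PySem.List.pyGet? table station).getD []) j 0)
        else
          let row := (PySem.List.pyGet? table station).getD []
          pySetAt table station
            (pySetAt row j
              ((PySem.List.pyGet? row j).getD 0 *
                PySem.Dict.getD codeDict ((PySem.Str.pyGet? s bit).getD ' ') 0))) table) walshtable
  (PySem.List.pyRange 0 p 1).foldl (fun sum_t j =>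
    sum_t ++ [(PySem.List.pyRange 0 n 1).foldl (fun tsum i =>
      tsum + (PySem.List.pyGet? ((PySem.List.pyGet? table i).getD []) j).getD 0) 0]) []

-- ===== PORT B =====
def updateWalshTable_alt (walshtable : List (List Int)) (bit : Int) (data : List String) (p : Int) : List Int :=
  (PySem.List.pyRange 0 p 1).map (fun j =>
    ((PySem.List.enumerate data 0).map (fun pr =>
      if bit ≥ PySem.Str.len pr.2 then 0
      else (PySem.List.pyGet? ((PySem.List.pyGet? walshtable pr.1).getD []) j).getD 0 *
        PySem.Dict.getD codeDict ((PySem.Str.pyGet? pr.2 bit).getD ' ') 0)).sum)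

-- ===== PRECONDITION & SPEC =====
-- Pre_ is exactly the inputs on which A returns (no exception): when p > 0, A indexes
-- table[station][j] for every station < len(data), j < p (IndexError otherwise), and where
-- bit < len(data[station]) it reads data[station][bit] (IndexError if bit < -len) and looks it
-- up in code (KeyError unless the character is '0' or '1').
def Pre_updateWalshTable (walshtable : List (List Int)) (bit : Int) (data : List String) (p : Int) : Prop :=
  0 < p →
    data.length ≤ walshtable.length ∧
    ∀ i : Nat, i < data.length →
      p ≤ ((walshtable.getD i []).length : Int) ∧
      (bit < ((data.getD i "").toList.length : Int) →
        ((PySem.Str.pyGet? (data.getD i "") bit).any (fun c => c == '0' || c == '1')) = true)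

instance (walshtable : List (List Int)) (bit : Int) (data : List String) (p : Int) : Decidable (Pre_updateWalshTable walshtable bit data p) := by unfold Pre_updateWalshTable; infer_instance

def pvWitness_updateWalshTable : List (List Int) × Int × List String × Int :=
  ([[1, 1], [1, -1]], 0, ["1", "0"], 2)

def Spec_updateWalshTable (walshtable : List (List Int)) (bit : Int) (data : List String) (p : Int) (out : List Int) : Prop := out = updateWalshTable_alt walshtable bit data p
instance (walshtable : List (List Int)) (bit : Int) (data : List String) (p : Int) (out : List Int) : Decidable (Spec_updateWalshTable walshtable bit data p out) := by unfold Spec_updateWalshTable; infer_instance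

-- ===== CLAIM (what is proved, stated in full; the proofs are below) =====
def Claim_equal_updateWalshTable : Prop := ∀ (walshtable : List (List Int)) (bit : Int) (data : List String) (p : Int), Dom_updateWalshTable walshtable bit data p → Pre_updateWalshTable walshtable bit data p → Spec_updateWalshTable walshtable bit data p (updateWalshTable walshtable bit data p)

-- ===== LEMMAS AND PROOFS =====

-- the per-cell update A performs at row entry j of station i's row (r = the current row)
def cellStep (bit : Int) (s : String) (r : List Int) (j : Nat) : List Int :=
  r.set j (if bit ≥ PySem.Str.len s then 0
           else r.getD j 0 * PySem.Dict.getD codeDict ((PySem.Str.pyGet? s bit).getD ' ') 0)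

theorem rowFold_length (bit : Int) (s : String) (js : List Nat) (r : List Int) :
    ((js.foldl (cellStep bit s) r).length) = r.length := by
  induction js generalizing r with
  | nil => rfl
  | cons j t ih => simp [List.foldl_cons, ih, cellStep]

theorem rowFold_cells (bit : Int) (s : String) (pn : Nat) (r : List Int) (k : Nat)
    (hk : k < r.length) :
    ((List.range pn).foldl (cellStep bit s) r).getD k 0 =
      if k < pn then
        (if bit ≥ PySem.Str.len s then 0
         else r.getD k 0 * PySem.Dict.getD codeDict ((PySem.Str.pyGet? s bit).getD ' ') 0)
      else r.getD k 0 := by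
  induction pn with
  | zero => simp
  | succ m ih =>
    rw [List.range_succ, List.foldl_append]
    simp only [List.foldl_cons, List.foldl_nil]
    rw [show (cellStep bit s ((List.range m).foldl (cellStep bit s) r) m) =
        ((List.range m).foldl (cellStep bit s) r).set m
          (if bit ≥ PySem.Str.len s then 0
           else ((List.range m).foldl (cellStep bit s) r).getD m 0 *
             PySem.Dict.getD codeDict ((PySem.Str.pyGet? s bit).getD ' ') 0) from rfl]
    by_cases hkm : k = m
    · subst hkm
      have hlen : k < ((List.range k).foldl (cellStep bit s) r).length := by
        rw [rowFold_length]; exact hk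
      rw [List.getD_eq_getElem?_getD, List.getElem?_set_self hlen]
      simp only [Option.getD_some]
      rw [if_pos (Nat.lt_succ_self k)]
      have h2 := ih
      rw [if_neg (Nat.lt_irrefl k)] at h2
      rw [h2]
    · rw [List.getD_eq_getElem?_getD, List.getElem?_set_ne (fun h => hkm h.symm),
        ← List.getD_eq_getElem?_getD, ih]
      rcases Nat.lt_or_ge k m with h | h
      · rw [if_pos h, if_pos (Nat.lt_succ_of_lt h)]
      · rw [if_neg (Nat.not_lt.mpr h), if_neg (by omega)]

theorem tableFold_length (f : Nat → List Int → List Int) (m : Nat) (t : List (List Int)) :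
    (((List.range m).foldl (fun t st => t.set st (f st (t.getD st []))) t).length) = t.length := by
  induction m with
  | zero => rfl
  | succ k ih =>
    rw [List.range_succ, List.foldl_append]
    simp only [List.foldl_cons, List.foldl_nil, List.length_set]
    exact ih

theorem tableFold_cells (f : Nat → List Int → List Int) (m : Nat) (t : List (List Int)) (i : Nat) :
    ((List.range m).foldl (fun t st => t.set st (f st (t.getD st []))) t).getD i [] =
      if i < m ∧ i < t.length then f i (t.getD i []) else t.getD i [] := by
  induction m generalizing i with
  | zero => simp
  | succ k ih =>
    rw [List.range_succ, List.foldl_append]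
    simp only [List.foldl_cons, List.foldl_nil]
    set T := (List.range k).foldl (fun t st => t.set st (f st (t.getD st []))) t with hT
    have hTlen : T.length = t.length := tableFold_length f k t
    have hTk : T.getD k [] = t.getD k [] := by
      rw [ih k]; simp
    by_cases hik : i = k
    · subst hik
      by_cases hlen : i < t.length
      · rw [List.getD_eq_getElem?_getD, List.getElem?_set_self (by omega),
          Option.getD_some, hTk, if_pos ⟨Nat.lt_succ_self i, hlen⟩]
      · rw [List.set_eq_of_length_le (by omega), ih i, if_neg (by omega), if_neg (by omega)]
    · rw [List.getD_eq_getElem?_getD, List.getElem?_set_ne (fun h => hik h.symm),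
        ← List.getD_eq_getElem?_getD, ih i]
      rcases Nat.lt_or_ge i k with h | h
      · by_cases hl : i < t.length
        · rw [if_pos ⟨h, hl⟩, if_pos ⟨by omega, hl⟩]
        · rw [if_neg (by omega), if_neg (by omega)]
      · rw [if_neg (by omega), if_neg (by omega)]

-- A's inner j-loop over the whole table equals updating station's row with cellStep
theorem innerFold_eq (bit : Int) (data : List String) (js : List Nat)
    (t : List (List Int)) (st : Nat) (hst : st < t.length) :
    ((js.map (Nat.cast : Nat → Int)).foldl (fun table j =>
        if bit ≥ PySem.Str.len ((PySem.List.pyGet? data (st : Int)).getD "") then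
          pySetAt table (st : Int)
            (pySetAt ((PySem.List.pyGet? table (st : Int)).getD []) j 0)
        else
          pySetAt table (st : Int)
            (pySetAt ((PySem.List.pyGet? table (st : Int)).getD []) j
              ((PySem.List.pyGet? ((PySem.List.pyGet? table (st : Int)).getD []) j).getD 0 *
                PySem.Dict.getD codeDict ((PySem.Str.pyGet? ((PySem.List.pyGet? data (st : Int)).getD "") bit).getD ' ') 0))) t)
    = t.set st (js.foldl (cellStep bit ((PySem.List.pyGet? data (st : Int)).getD "")) (t.getD st [])) := by
  induction js generalizing t with
  | nil =>
    simp only [List.map_nil, List.foldl_nil]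
    rw [List.getD_eq_getElem?_getD, List.getElem?_eq_getElem hst, Option.getD_some,
      List.set_getElem_self hst]
  | cons j rest ih =>
    simp only [List.map_cons, List.foldl_cons]
    have hstep : (if bit ≥ PySem.Str.len ((PySem.List.pyGet? data (st : Int)).getD "") then
          pySetAt t (st : Int)
            (pySetAt ((PySem.List.pyGet? t (st : Int)).getD []) ((j : Nat) : Int) 0)
        else
          pySetAt t (st : Int)
            (pySetAt ((PySem.List.pyGet? t (st : Int)).getD []) ((j : Nat) : Int)
              ((PySem.List.pyGet? ((PySem.List.pyGet? t (st : Int)).getD []) ((j : Nat) : Int)).getD 0 *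
                PySem.Dict.getD codeDict ((PySem.Str.pyGet? ((PySem.List.pyGet? data (st : Int)).getD "") bit).getD ' ') 0)))
        = t.set st (cellStep bit ((PySem.List.pyGet? data (st : Int)).getD "") (t.getD st []) j) := by
      simp only [cellStep, pySetAt, PySem.List.pyGet?_natCast, Int.toNat_natCast,
        List.getD_eq_getElem?_getD]
      split_ifs <;> rfl
    rw [hstep, ih _ (by simpa using hst)]
    rw [List.set_set]
    congr 1
    rw [List.getD_eq_getElem?_getD, List.getElem?_set_self hst, Option.getD_some,
      List.getD_eq_getElem?_getD]

-- A's whole mutation loop with the station indices as a Nat list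
theorem outerFold_eq (bit : Int) (data : List String) (p : Int)
    (sts : List Nat) (t : List (List Int)) (hsts : ∀ st ∈ sts, st < t.length) :
    ((sts.map (Nat.cast : Nat → Int)).foldl (fun table station =>
      (PySem.List.pyRange 0 p 1).foldl (fun table j =>
        if bit ≥ PySem.Str.len ((PySem.List.pyGet? data station).getD "") then
          pySetAt table station
            (pySetAt ((PySem.List.pyGet? table station).getD []) j 0)
        else
          pySetAt table station
            (pySetAt ((PySem.List.pyGet? table station).getD []) j
              ((PySem.List.pyGet? ((PySem.List.pyGet? table station).getD []) j).getD 0 *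
                PySem.Dict.getD codeDict ((PySem.Str.pyGet? ((PySem.List.pyGet? data station).getD "") bit).getD ' ') 0))) table) t)
    = sts.foldl (fun t st =>
        t.set st ((List.range p.toNat).foldl
          (cellStep bit ((PySem.List.pyGet? data (st : Int)).getD "")) (t.getD st []))) t := by
  induction sts generalizing t with
  | nil => rfl
  | cons st rest ih =>
    simp only [List.map_cons, List.foldl_cons]
    have hst : st < t.length := hsts st (List.mem_cons_self)
    have hrange : PySem.List.pyRange 0 p 1 = (List.range p.toNat).map (Nat.cast : Nat → Int) := by
      rw [PySem.List.pyRange_one]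
      simp
    rw [hrange, innerFold_eq bit data (List.range p.toNat) t st hst, ← hrange]
    exact ih _ (fun x hx => by
      simpa using hsts x (List.mem_cons_of_mem _ hx))

theorem updateWalshTable_spec : Claim_equal_updateWalshTable := by
  unfold Claim_equal_updateWalshTable
  intro walshtable bit data p _ hpre
  unfold Spec_updateWalshTable updateWalshTable updateWalshTable_alt
  by_cases hp : 0 < p
  case neg =>
    have h0 : PySem.List.pyRange 0 p 1 = [] := by
      rw [PySem.List.pyRange_one]
      simp
      omega
    simp only [h0, List.foldl_nil, List.map_nil]
  case pos =>
    obtain ⟨hle, hrows⟩ := hpre hp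
    have hnr : PySem.List.pyRange 0 (PySem.List.len data) 1
        = (List.range data.length).map (Nat.cast : Nat → Int) := by
      rw [PySem.List.len_eq, PySem.List.pyRange_one]
      simp
    simp only [hnr]
    rw [outerFold_eq bit data p (List.range data.length) walshtable
      (fun st hst => lt_of_lt_of_le (List.mem_range.mp hst) hle)]
    set T := (List.range data.length).foldl (fun t st =>
        t.set st ((List.range p.toNat).foldl
          (cellStep bit ((PySem.List.pyGet? data (st : Int)).getD "")) (t.getD st []))) walshtable with hTdef
    have hTcells : ∀ i : Nat, i < data.length →
        T.getD i [] = (List.range p.toNat).foldl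
          (cellStep bit ((PySem.List.pyGet? data (i : Int)).getD "")) (walshtable.getD i []) := by
      intro i hi
      rw [hTdef, tableFold_cells (fun st r => (List.range p.toNat).foldl
          (cellStep bit ((PySem.List.pyGet? data (st : Int)).getD "")) r) data.length walshtable i,
        if_pos ⟨hi, lt_of_lt_of_le hi hle⟩]
    rw [PySem.List.foldl_append_singleton_eq_map, List.nil_append]
    apply List.map_congr_left
    intro j hj
    have hj' : 0 ≤ j ∧ j < p := PySem.List.mem_pyRange_one.mp hj
    rw [PySem.List.foldl_add, zero_add]
    have hnr2 : PySem.List.pyRange 0 (data.length : Int) 1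
        = (List.range data.length).map (Nat.cast : Nat → Int) := by
      rw [PySem.List.pyRange_one]
      simp
    rw [PySem.List.enumerate_eq_map_pyRange (d := ""), PySem.List.len_eq, List.map_map]
    rw [hnr2, List.map_map, List.map_map]
    congr 1
    apply List.map_congr_left
    intro k hk
    have hk' : k < data.length := List.mem_range.mp hk
    obtain ⟨hrowlen, _⟩ := hrows k hk'
    simp only [Function.comp]
    have hTk : (PySem.List.pyGet? T (k : Int)).getD [] = T.getD k [] := by
      rw [PySem.List.pyGet?_natCast, List.getD_eq_getElem?_getD]
    rw [hTk, hTcells k hk']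
    have hrow : (PySem.List.pyGet? data (k : Int)).getD "" = data.getD k "" := by
      rw [PySem.List.pyGet?_natCast, List.getD_eq_getElem?_getD]
    have hjk : (PySem.List.pyGet? ((List.range p.toNat).foldl
        (cellStep bit ((PySem.List.pyGet? data (k : Int)).getD "")) (walshtable.getD k [])) j).getD 0
        = ((List.range p.toNat).foldl
          (cellStep bit ((PySem.List.pyGet? data (k : Int)).getD "")) (walshtable.getD k [])).getD j.toNat 0 := by
      rw [PySem.List.pyGet?_of_nonneg _ hj'.1]
      exact List.getD_eq_getElem?_getD.symm
    rw [hjk, rowFold_cells bit _ p.toNat (walshtable.getD k []) j.toNat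
        (by omega), if_pos (by omega)]
    rw [hrow]
    have hwrow : (PySem.List.pyGet? walshtable (k : Int)).getD [] = walshtable.getD k [] := by
      rw [PySem.List.pyGet?_natCast, List.getD_eq_getElem?_getD]
    have hjw : (PySem.List.pyGet? (walshtable.getD k []) j).getD 0
        = (walshtable.getD k []).getD j.toNat 0 := by
      rw [PySem.List.pyGet?_of_nonneg _ hj'.1]
      exact List.getD_eq_getElem?_getD.symm
    rw [PySem.List.pyGetD_natCast, hwrow, hjw]
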